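-- pv_equiv track=rewrite | github.com/fliphilipp/GlacierLakeDetectionICESat2 | mprof_plotter.py | function_labels
-- ===== SOURCE A (Python) =====
-- def function_labels(dotted_function_names):
--     state = {}
--
--     def set_state_for(function_names, level):
--         for fn in function_names:
--             label = ".".join(fn.split(".")[-level:])
--             label_state = state.setdefault(label, {"functions": [],
--                                                    "level": level})
--             label_state["functions"].append(fn)
--
--     set_state_for(dotted_function_names, 1)
--
--     while True:
--         ambiguous_labels = [label for label in state if len(state[label]["functions"]) > 1]
--         for ambiguous_label in ambiguous_labels:
--             function_names = state[ambiguous_label]["functions"]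
--             new_level = state[ambiguous_label]["level"] + 1
--             del state[ambiguous_label]
--             set_state_for(function_names, new_level)
--         if len(ambiguous_labels) == 0:
--             break
--
--     fn_to_label = dict((label_state["functions"][0] , label) for label, label_state in state.items())
--
--     return fn_to_label
-- ===== SOURCE B (Python) =====
-- def function_labels(dotted_function_names):
--     # Worklist refinement: pending groups of names sharing their current suffix;
--     # singleton groups are finalized into `done`, ambiguous ones are re-grouped
--     # one level deeper.  No shared dict, no rescans of already-resolved labels.
--     def grouped(names, level):
--         g = {}
--         for fn in names:
--             g.setdefault(".".join(fn.split(".")[-level:]), []).append(fn)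
--         return list(g.items())
--
--     done = []
--     pending = grouped(dotted_function_names, 1)
--     level = 1
--     while pending:
--         level += 1
--         nxt = []
--         for label, members in pending:
--             if len(members) == 1:
--                 done.append((members[0], label))
--             else:
--                 nxt.extend(grouped(members, level))
--         pending = nxt
--     return dict(done)
-- ===== Notes on version B (the rewrite author's own statement) =====
-- stated objective: alternative
-- what changed: Replaced A's shared label dict with its repeated full rescans for ambiguous labels, deletions and setdefault re-insertions by a worklist refinement: a list of pending suffix-groups is split one dot-level deeper per round, singletons are appended to a done list, and resolved labels are never revisited.
import Mathlib
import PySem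

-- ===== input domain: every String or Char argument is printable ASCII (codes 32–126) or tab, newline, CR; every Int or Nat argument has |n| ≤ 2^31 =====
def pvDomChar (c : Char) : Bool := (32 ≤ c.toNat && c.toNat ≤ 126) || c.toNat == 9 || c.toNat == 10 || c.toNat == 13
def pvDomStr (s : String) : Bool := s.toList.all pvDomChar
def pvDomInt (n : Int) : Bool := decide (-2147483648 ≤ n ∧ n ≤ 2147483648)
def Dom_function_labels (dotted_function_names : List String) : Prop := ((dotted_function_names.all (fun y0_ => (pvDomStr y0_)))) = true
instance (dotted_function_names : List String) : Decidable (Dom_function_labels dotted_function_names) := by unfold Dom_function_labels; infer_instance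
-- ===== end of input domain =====

-- B replaces A's shared label-dict — rescanned in full every round, with deletions and
-- setdefault re-insertions — by a worklist of pending suffix-groups refined one dot-level per
-- round into a done-list plus the next round's groups (objective: alternative algorithm).

-- ===== PORT A =====
-- ".".join(fn.split(".")[-level:])  — shared by both ports (both Pythons contain this expression).
-- "." is a nonempty separator, so split? never returns none and the getD default is never taken.
def pvSplit (fn : String) : List String := (PySem.Str.split? fn ".").getD []

def pvLabel (level : Int) (fn : String) : String :=
  PySem.Str.join "." (PySem.List.slice (pvSplit fn) (some (-level)) none)


def pvSetState (function_names : List String) (level : Int)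
    (state : PySem.Dict String (List String × Int)) : PySem.Dict String (List String × Int) :=
  function_names.foldl (fun st fn =>
    match st.get? (pvLabel level fn) with
    | some (g, lv) => st.insert (pvLabel level fn) (g ++ [fn], lv)
    | none => st.insert (pvLabel level fn) ([fn], level)) state

def pvAStep (st : PySem.Dict String (List String × Int)) (l : String) :
    PySem.Dict String (List String × Int) :=
  match st.get? l with
  | some (fns, lv) => pvSetState fns (lv + 1) (st.erase l)
  | none => st

def pvFuel (names : List String) : Nat := names.foldl (fun a s => a + s.length) 0 + 2

def pvLoopA (fuel : Nat) (st : PySem.Dict String (List String × Int)) :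
    PySem.Dict String (List String × Int) :=
  match fuel with
  | 0 => st
  | fuel + 1 =>
    let ambiguous := (st.items.filter (fun e => decide (e.2.1.length > 1))).map (·.1)
    let st' := ambiguous.foldl pvAStep st
    if ambiguous.isEmpty then st' else pvLoopA fuel st'

def function_labels (dotted_function_names : List String) : List (String × String) :=
  let final := pvLoopA (pvFuel dotted_function_names)
    (pvSetState dotted_function_names 1 PySem.Dict.empty)
  final.items.map (fun e => (e.2.1.headI, e.1))


-- ===== PORT B =====
-- grouped(names, level): the dict-grouping by level-suffix, returned as its item list
def pvGrouped (names : List String) (level : Int) : List (String × List String) :=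
  (names.foldl (fun g fn =>
    match g.get? (pvLabel level fn) with
    | some ms => g.insert (pvLabel level fn) (ms ++ [fn])
    | none => g.insert (pvLabel level fn) [fn]) PySem.Dict.empty).items


def pvLoopB (fuel : Nat) (level : Int) (done : List (String × String))
    (pending : List (String × List String)) : List (String × String) :=
  match fuel with
  | 0 => done ++ pending.map (fun p => (p.2.headI, p.1))
  | fuel + 1 =>
    if pending.isEmpty then done
    else
      let step := pending.foldl (fun (acc : List (String × String) × List (String × List String)) p =>
        if p.2.length = 1 then (acc.1 ++ [(p.2.headI, p.1)], acc.2)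
        else (acc.1, acc.2 ++ pvGrouped p.2 (level + 1))) (done, [])
      pvLoopB fuel (level + 1) step.1 step.2

def function_labels_alt (dotted_function_names : List String) : List (String × String) :=
  pvLoopB (pvFuel dotted_function_names) 1 [] (pvGrouped dotted_function_names 1)


-- ===== PRECONDITION & SPEC =====
-- (no Pre_: the two ports agree on every input; on duplicate names both Pythons diverge identically)
def Spec_function_labels (dotted_function_names : List String) (out : List (String × String)) : Prop := out = function_labels_alt dotted_function_names
instance (dotted_function_names : List String) (out : List (String × String)) : Decidable (Spec_function_labels dotted_function_names out) := by unfold Spec_function_labels; infer_instance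

-- ===== CLAIM (what is proved, stated in full; the proofs are below) =====
def Claim_equal_function_labels : Prop := ∀ (dotted_function_names : List String), Dom_function_labels dotted_function_names → Spec_function_labels dotted_function_names (function_labels dotted_function_names)

-- ===== LEMMAS AND PROOFS =====

def pvMySplit : List Char → List Char → List (List Char)
  | [], cur => [cur.reverse]
  | c :: rest, cur => if c = '.' then cur.reverse :: pvMySplit rest [] else pvMySplit rest (c :: cur)

theorem pvGo_eq (fuel : Nat) : ∀ (l cur : List Char) (acc : List (List Char)),
    l.length < fuel →
    PySem.Chars.splitOn.go ['.'] fuel l cur acc = acc.reverse ++ pvMySplit l cur := by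
  induction fuel with
  | zero => intro l cur acc h; omega
  | succ fuel ih =>
    intro l cur acc h
    cases l with
    | nil => simp [PySem.Chars.splitOn.go, pvMySplit]
    | cons c rest =>
      by_cases hc : c = '.'
      · subst hc
        rw [PySem.Chars.splitOn.go]
        simp only [List.isPrefixOf, List.length_cons] at *
        rw [if_pos (by simp)]
        rw [show List.drop ((([]:List Char)).length + 1) ('.' :: rest) = rest from by simp]
        rw [ih rest [] (cur.reverse :: acc) (by omega)]
        simp [pvMySplit]
      · rw [PySem.Chars.splitOn.go]
        rw [if_neg (by simp [List.isPrefixOf, hc, Ne.symm hc])]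
        rw [ih rest (c :: cur) acc (by simp at h ⊢; omega)]
        simp [pvMySplit, hc]

theorem pvSplitOn_eq (s : List Char) : PySem.Chars.splitOn s ['.'] = pvMySplit s [] := by
  rw [PySem.Chars.splitOn, pvGo_eq (s.length + 1) s [] [] (by omega)]
  simp

theorem pvMySplit_ne_nil (l cur : List Char) : pvMySplit l cur ≠ [] := by
  induction l generalizing cur with
  | nil => simp [pvMySplit]
  | cons c rest ih => by_cases hc : c = '.' <;> simp [pvMySplit, hc, ih]

theorem pvMySplit_dotfree (l : List Char) : ∀ cur, ('.' : Char) ∉ cur →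
    ∀ p ∈ pvMySplit l cur, ('.' : Char) ∉ p := by
  induction l with
  | nil => intro cur hc p hp; simp [pvMySplit] at hp; subst hp; simpa using hc
  | cons c rest ih =>
    intro cur hc p hp
    by_cases h : c = '.'
    · subst h; simp [pvMySplit] at hp
      rcases hp with hp | hp
      · subst hp; simpa using hc
      · exact ih [] (by simp) p hp
    · simp [pvMySplit, h] at hp
      exact ih (c :: cur) (by simp [hc, Ne.symm h]) p hp

theorem pvSplit_eq (fn : String) :
    pvSplit fn = (pvMySplit fn.toList []).map String.ofList := by
  simp [pvSplit, PySem.Str.split?, PySem.Chars.split?, pvSplitOn_eq,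
    show (".".toList : List Char) = ['.'] from rfl]

theorem pvParts_ne_nil (fn : String) : pvSplit fn ≠ [] := by
  simp [pvSplit_eq]; exact pvMySplit_ne_nil _ _

theorem pvParts_dotfree (fn : String) : ∀ p ∈ pvSplit fn, ('.' : Char) ∉ p.toList := by
  rw [pvSplit_eq]
  intro p hp
  simp only [List.mem_map] at hp
  obtain ⟨q, hq, rfl⟩ := hp
  rw [String.toList_ofList]
  exact pvMySplit_dotfree _ [] (by simp) q hq

def pvSufP (k : Nat) (ps : List String) : List String := ps.drop (ps.length - k)

theorem pvLabel_eq (level : Int) (fn : String) (h : 1 ≤ level) :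
    pvLabel level fn = PySem.Str.join "." (pvSufP level.toNat (pvSplit fn)) := by
  unfold pvLabel pvSufP
  congr 1
  unfold PySem.List.slice PySem.List.clampIdx
  have h1 : (-level) < 0 := by omega
  simp only [if_pos h1]
  set ps := pvSplit fn
  by_cases h2 : (ps.length : Int) + (-level) < 0
  · rw [if_pos h2]
    have : ps.length - level.toNat = 0 := by omega
    rw [this]
    simp
  · rw [if_neg h2]
    have : ((ps.length : Int) + (-level)).toNat = ps.length - level.toNat := by omega
    rw [this]
    apply List.take_of_length_le
    simp

theorem pvSufP_ne_nil {k : Nat} {ps : List String} (hk : 1 ≤ k) (hps : ps ≠ []) :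
    pvSufP k ps ≠ [] := by
  unfold pvSufP
  rw [Ne, List.drop_eq_nil_iff]
  have := List.length_pos_iff.mpr hps
  omega

theorem pvSufP_sufP {j k : Nat} (ps : List String) (h : j ≤ k) :
    pvSufP j (pvSufP k ps) = pvSufP j ps := by
  unfold pvSufP
  rw [List.drop_drop, List.length_drop]
  congr 1
  omega

theorem pvJoin_inj {ps qs : List String}
    (hp : ∀ p ∈ ps, ('.' : Char) ∉ p.toList) (hq : ∀ p ∈ qs, ('.' : Char) ∉ p.toList)
    (hp0 : ps ≠ []) (hq0 : qs ≠ [])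
    (h : PySem.Str.join "." ps = PySem.Str.join "." qs) : ps = qs := by
  have h' := congrArg String.toList h
  rw [PySem.Str.toList_join, PySem.Str.toList_join] at h'
  have hj : PySem.Chars.join ".".toList = fun ls => (['.'] : List Char).intercalate ls := by
    funext ls; rfl
  rw [hj] at h'
  have h2 := congrArg (List.splitOn '.') h'
  have hp' : ∀ l ∈ ps.map String.toList, ('.' : Char) ∉ l := by
    intro l hl
    simp only [List.mem_map] at hl
    obtain ⟨p, hpmem, rfl⟩ := hl
    exact hp p hpmem
  have hq' : ∀ l ∈ qs.map String.toList, ('.' : Char) ∉ l := by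
    intro l hl
    simp only [List.mem_map] at hl
    obtain ⟨p, hpmem, rfl⟩ := hl
    exact hq p hpmem
  rw [List.splitOn_intercalate _ '.' hp' (by simpa using hp0),
      List.splitOn_intercalate _ '.' hq' (by simpa using hq0)] at h2
  exact List.map_injective_iff.mpr (fun a b hab => String.toList_inj.mp hab) h2

theorem pvLabel_inj {k k' : Int} {fn fn' : String} (hk : 1 ≤ k) (hk' : 1 ≤ k')
    (h : pvLabel k fn = pvLabel k' fn') :
    pvSufP k.toNat (pvSplit fn) = pvSufP k'.toNat (pvSplit fn') := by
  rw [pvLabel_eq _ _ hk, pvLabel_eq _ _ hk'] at h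
  refine pvJoin_inj ?_ ?_ ?_ ?_ h
  · intro p hp; exact pvParts_dotfree fn p (List.mem_of_mem_drop hp)
  · intro p hp; exact pvParts_dotfree fn' p (List.mem_of_mem_drop hp)
  · exact pvSufP_ne_nil (by omega) (pvParts_ne_nil fn)
  · exact pvSufP_ne_nil (by omega) (pvParts_ne_nil fn')

theorem pvLabel_down {j k k' : Int} {fn fn' : String} (hj : 1 ≤ j) (hjk : j ≤ k) (hjk' : j ≤ k')
    (h : pvLabel k fn = pvLabel k' fn') : pvLabel j fn = pvLabel j fn' := by
  have h2 := pvLabel_inj (by omega) (by omega) h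
  have h3 := congrArg (pvSufP j.toNat) h2
  rw [pvSufP_sufP _ (by omega), pvSufP_sufP _ (by omega)] at h3
  rw [pvLabel_eq _ _ hj, pvLabel_eq _ _ hj, h3]

def pvSep (e1 e2 : String × (List String × Int)) : Prop :=
  ∀ fn1 ∈ e1.2.1, ∀ fn2 ∈ e2.2.1,
    pvLabel (min e1.2.2 e2.2.2) fn1 ≠ pvLabel (min e1.2.2 e2.2.2) fn2

def pvWF (level : Int) (e : String × (List String × Int)) : Prop :=
  e.2.1 ≠ [] ∧ 1 ≤ e.2.2 ∧ e.2.2 ≤ level ∧ ∀ fn ∈ e.2.1, pvLabel e.2.2 fn = e.1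

theorem pvSep_symm {e1 e2} (h : pvSep e1 e2) : pvSep e2 e1 := by
  intro fn1 h1 fn2 h2
  rw [min_comm]
  exact fun he => h fn2 h2 fn1 h1 he.symm

theorem pvSep_lift {e1 e2} (h : pvSep e1 e2) (h1 : 1 ≤ e1.2.2) (h2 : 1 ≤ e2.2.2)
    {K1 K2 : Int} (hK1 : min e1.2.2 e2.2.2 ≤ K1) (hK2 : min e1.2.2 e2.2.2 ≤ K2)
    {m1 m2 : String} (hm1 : m1 ∈ e1.2.1) (hm2 : m2 ∈ e2.2.1) :
    pvLabel K1 m1 ≠ pvLabel K2 m2 := by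
  intro he
  exact h m1 hm1 m2 hm2 (pvLabel_down (by omega) hK1 hK2 he)

theorem pvKeys_ne_of_sep {level level' : Int} {e1 e2} (h : pvSep e1 e2)
    (h1 : pvWF level e1) (h2 : pvWF level' e2) : e1.1 ≠ e2.1 := by
  obtain ⟨hne1, hl1, _, hlab1⟩ := h1
  obtain ⟨hne2, hl2, _, hlab2⟩ := h2
  obtain ⟨m1, hm1⟩ := List.exists_mem_of_ne_nil _ hne1
  obtain ⟨m2, hm2⟩ := List.exists_mem_of_ne_nil _ hne2
  rw [← hlab1 m1 hm1, ← hlab2 m2 hm2]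
  exact pvSep_lift h hl1 hl2 (min_le_left _ _) (min_le_right _ _) hm1 hm2

theorem pvFind?_none {ν : Type} (pre : List (String × ν)) (k : String)
    (h : k ∉ pre.map (·.1)) : pre.find? (fun p => p.1 == k) = none := by
  rw [List.find?_eq_none]
  intro p hp
  simp only [beq_iff_eq]
  intro hk
  exact h (List.mem_map.mpr ⟨p, hp, hk⟩)

theorem pvGet?_mk_append {ν : Type} (pre rest : List (String × ν)) (k : String)
    (h : k ∉ pre.map (·.1)) :
    (PySem.Dict.mk (pre ++ rest)).get? k = (PySem.Dict.mk rest).get? k := by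
  simp [PySem.Dict.get?, List.find?_append, pvFind?_none pre k h]

theorem pvContains_mk_append {ν : Type} (pre rest : List (String × ν)) (k : String)
    (h : k ∉ pre.map (·.1)) :
    (PySem.Dict.mk (pre ++ rest)).contains k = (PySem.Dict.mk rest).contains k := by
  simp only [PySem.Dict.contains, List.any_append]
  have : pre.any (fun p => p.1 == k) = false := by
    simp only [List.any_eq_false]
    intro p hp
    simp only [beq_iff_eq]
    intro hk
    exact h (List.mem_map.mpr ⟨p, hp, hk⟩)
  simp [this]

theorem pvInsert_mk_append {ν : Type} (pre rest : List (String × ν)) (k : String) (v : ν)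
    (h : k ∉ pre.map (·.1)) :
    (PySem.Dict.mk (pre ++ rest)).insert k v
      = PySem.Dict.mk (pre ++ ((PySem.Dict.mk rest).insert k v).items) := by
  have hpre : ∀ p ∈ pre, (if (p.1 == k) = true then (k, v) else p) = p := by
    intro p hp
    rw [if_neg]
    simp only [beq_iff_eq]
    intro hk
    exact h (List.mem_map.mpr ⟨p, hp, hk⟩)
  unfold PySem.Dict.insert
  rw [pvContains_mk_append pre rest k h]
  by_cases hc : (PySem.Dict.mk rest).contains k
  · rw [if_pos hc, if_pos hc]
    simp only [PySem.Dict.items, List.map_append]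
    rw [List.map_congr_left hpre]
    simp
  · rw [if_neg hc, if_neg hc]
    simp [List.append_assoc]

theorem pvSetState_mk_append (fns : List String) (lv : Int) :
    ∀ (pre rest : List (String × (List String × Int))),
    (∀ fn ∈ fns, pvLabel lv fn ∉ pre.map (·.1)) →
    pvSetState fns lv (PySem.Dict.mk (pre ++ rest))
      = PySem.Dict.mk (pre ++ (pvSetState fns lv (PySem.Dict.mk rest)).items) := by
  induction fns with
  | nil => intro pre rest h; simp [pvSetState]
  | cons fn fns ih =>
    intro pre rest h
    unfold pvSetState
    simp only [List.foldl_cons]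
    rw [pvGet?_mk_append pre rest _ (h fn (by simp))]
    have hins : ∀ v, (PySem.Dict.mk (pre ++ rest)).insert (pvLabel lv fn) v
        = PySem.Dict.mk (pre ++ ((PySem.Dict.mk rest).insert (pvLabel lv fn) v).items) :=
      fun v => pvInsert_mk_append pre rest _ v (h fn (by simp))
    cases hg : (PySem.Dict.mk rest).get? (pvLabel lv fn) with
    | none =>
      dsimp only
      rw [hins]
      have := ih pre (((PySem.Dict.mk rest).insert (pvLabel lv fn) ([fn], lv)).items)
        (fun f hf => h f (by simp [hf]))
      unfold pvSetState at this
      rw [this]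
    | some glv =>
      obtain ⟨g, lv0⟩ := glv
      dsimp only
      rw [hins]
      have := ih pre (((PySem.Dict.mk rest).insert (pvLabel lv fn) (g ++ [fn], lv0)).items)
        (fun f hf => h f (by simp [hf]))
      unfold pvSetState at this
      rw [this]

theorem pvSetState_fresh (fns : List String) (lv : Int)
    (st : PySem.Dict String (List String × Int))
    (h : ∀ fn ∈ fns, pvLabel lv fn ∉ st.items.map (·.1)) :
    (pvSetState fns lv st).items
      = st.items ++ (pvSetState fns lv (PySem.Dict.mk [])).items := by
  have h2 := pvSetState_mk_append fns lv st.items [] h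
  rw [List.append_nil] at h2
  have : PySem.Dict.mk st.items = st := rfl
  rw [this] at h2
  rw [h2]

def pvDeco (lv : Int) (p : String × List String) : String × (List String × Int) := (p.1, (p.2, lv))

theorem pvGet?_map_deco (lv : Int) (l : List (String × List String)) (k : String) :
    (PySem.Dict.mk (l.map (pvDeco lv))).get? k
      = ((PySem.Dict.mk l).get? k).map (fun ms => (ms, lv)) := by
  simp only [PySem.Dict.get?, PySem.Dict.items, List.find?_map]
  have : ((fun p : String × (List String × Int) => p.1 == k) ∘ pvDeco lv)
       = (fun p : String × List String => p.1 == k) := by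
    funext p; rfl
  rw [this]
  cases l.find? (fun p => p.1 == k) <;> rfl

theorem pvContains_map_deco (lv : Int) (l : List (String × List String)) (k : String) :
    (PySem.Dict.mk (l.map (pvDeco lv))).contains k = (PySem.Dict.mk l).contains k := by
  simp only [PySem.Dict.contains, PySem.Dict.items, List.any_map]
  congr 1

theorem pvInsert_map_deco (lv : Int) (l : List (String × List String)) (k : String) (ms : List String) :
    (PySem.Dict.mk (l.map (pvDeco lv))).insert k (ms, lv)
      = PySem.Dict.mk (((PySem.Dict.mk l).insert k ms).items.map (pvDeco lv)) := by
  unfold PySem.Dict.insert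
  rw [pvContains_map_deco]
  by_cases hc : (PySem.Dict.mk l).contains k
  · rw [if_pos hc, if_pos hc]
    simp only [PySem.Dict.items, List.map_map]
    congr 1
    apply List.map_congr_left
    intro p _
    by_cases hp : p.1 = k <;> simp [pvDeco, hp]
  · rw [if_neg hc, if_neg hc]
    simp [pvDeco]

theorem pvGrouped_deco_aux (fns : List String) (lv : Int) :
    ∀ (l : List (String × List String)),
    (fns.foldl (fun st fn =>
      match st.get? (pvLabel lv fn) with
      | some (g, lv0) => st.insert (pvLabel lv fn) (g ++ [fn], lv0)
      | none => st.insert (pvLabel lv fn) ([fn], lv)) (PySem.Dict.mk (l.map (pvDeco lv)))).items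
      = ((fns.foldl (fun g fn =>
          match g.get? (pvLabel lv fn) with
          | some ms => g.insert (pvLabel lv fn) (ms ++ [fn])
          | none => g.insert (pvLabel lv fn) [fn]) (PySem.Dict.mk l)).items).map (pvDeco lv) := by
  induction fns with
  | nil => intro l; simp
  | cons fn fns ih =>
    intro l
    simp only [List.foldl_cons]
    rw [pvGet?_map_deco]
    cases hg : (PySem.Dict.mk l).get? (pvLabel lv fn) with
    | none =>
      dsimp only [Option.map_none]
      rw [pvInsert_map_deco]
      exact ih _
    | some ms =>
      dsimp only [Option.map_some]
      rw [show (([fn] : List String) : List String) = [fn] from rfl]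
      rw [pvInsert_map_deco]
      exact ih _

theorem pvGrouped_deco (fns : List String) (lv : Int) :
    (pvSetState fns lv (PySem.Dict.mk [])).items = (pvGrouped fns lv).map (pvDeco lv) := by
  have := pvGrouped_deco_aux fns lv []
  simpa [pvSetState, pvGrouped, PySem.Dict.empty] using this

def pvGStep (lv : Int) : PySem.Dict String (List String) → String → PySem.Dict String (List String) :=
  fun g fn =>
    match g.get? (pvLabel lv fn) with
    | some ms => g.insert (pvLabel lv fn) (ms ++ [fn])
    | none => g.insert (pvLabel lv fn) [fn]

theorem pvGrouped_eq_fold (fns : List String) (lv : Int) :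
    pvGrouped fns lv = (fns.foldl (pvGStep lv) PySem.Dict.empty).items := rfl

theorem pvGFold_facts (lv : Int) (fns : List String) :
    ∀ (d : PySem.Dict String (List String)) (univ : List String),
    (∀ p ∈ d.items, p.2 ≠ [] ∧ (∀ fn ∈ p.2, pvLabel lv fn = p.1) ∧ ∀ fn ∈ p.2, fn ∈ univ) →
    (∀ fn ∈ fns, fn ∈ univ) →
    ∀ p ∈ (fns.foldl (pvGStep lv) d).items,
      p.2 ≠ [] ∧ (∀ fn ∈ p.2, pvLabel lv fn = p.1) ∧ ∀ fn ∈ p.2, fn ∈ univ := by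
  induction fns with
  | nil => intro d univ hd _ ; exact hd
  | cons x xs ih =>
    intro d univ hd hu
    simp only [List.foldl_cons]
    apply ih _ univ _ (fun f hf => hu f (by simp [hf]))
    intro p hp
    unfold pvGStep at hp
    cases hg : d.get? (pvLabel lv x) with
    | none =>
      rw [hg] at hp
      dsimp only at hp
      rcases (PySem.Dict.mem_items_insert _ _ _ _).mp hp with h | ⟨h, _⟩
      · subst h
        refine ⟨by simp, ?_, ?_⟩
        · intro f hf
          simp only [List.mem_singleton] at hf
          subst hf
          rfl
        · intro f hf
          simp only [List.mem_singleton] at hf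
          subst hf
          exact hu _ (by simp)
      · exact hd p h
    | some ms =>
      rw [hg] at hp
      dsimp only at hp
      rcases (PySem.Dict.mem_items_insert _ _ _ _).mp hp with h | ⟨h, _⟩
      · subst h
        have hms := hd _ (PySem.Dict.mem_items_of_get?_eq_some _ hg)
        refine ⟨by simp, ?_, ?_⟩
        · intro f hf
          rcases List.mem_append.mp hf with h' | h'
          · exact hms.2.1 f h'
          · simp only [List.mem_singleton] at h'
            subst h'
            rfl
        · intro f hf
          rcases List.mem_append.mp hf with h' | h'
          · exact hms.2.2 f h'
          · simp only [List.mem_singleton] at h'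
            subst h'
            exact hu _ (by simp)
      · exact hd p h

theorem pvGrouped_wf (fns : List String) (lv : Int) :
    ∀ p ∈ pvGrouped fns lv, p.2 ≠ [] ∧ (∀ fn ∈ p.2, pvLabel lv fn = p.1) ∧ ∀ fn ∈ p.2, fn ∈ fns := by
  rw [pvGrouped_eq_fold]
  exact pvGFold_facts lv fns PySem.Dict.empty fns (by simp [PySem.Dict.empty]) (fun f hf => hf)

theorem pvGrouped_keys_nodup (fns : List String) (lv : Int) :
    ((pvGrouped fns lv).map (·.1)).Nodup := by
  rw [pvGrouped_eq_fold]
  have hstep : pvGStep lv = fun g fn => g.insert (pvLabel lv fn)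
      (match g.get? (pvLabel lv fn) with
       | some ms => ms ++ [fn]
       | none => [fn]) := by
    funext g fn
    unfold pvGStep
    cases g.get? (pvLabel lv fn) <;> rfl
  rw [hstep]
  have := PySem.Dict.nodup_keys_foldl_insert_key (ν := List String) fns (fun fn => pvLabel lv fn)
    (fun g fn => match g.get? (pvLabel lv fn) with | some ms => ms ++ [fn] | none => [fn])
    PySem.Dict.empty (by simp [PySem.Dict.empty, PySem.Dict.keys])
  simpa [PySem.Dict.keys] using this

theorem pvGrouped_sep (fns : List String) (lv : Int) :
    ((pvGrouped fns lv).map (pvDeco lv)).Pairwise pvSep := by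
  rw [List.pairwise_map]
  have hnd : (pvGrouped fns lv).Pairwise (fun a b => a.1 ≠ b.1) :=
    List.pairwise_map.mp (pvGrouped_keys_nodup fns lv)
  refine hnd.imp_of_mem ?_
  intro p q hp hq hne
  intro m1 hm1 m2 hm2
  have l1 := (pvGrouped_wf fns lv p hp).2.1 m1 hm1
  have l2 := (pvGrouped_wf fns lv q hq).2.1 m2 hm2
  simp only [pvDeco, min_self]
  rw [l1, l2]
  exact hne

theorem pvKeysNe_of_list {l : List (String × (List String × Int))}
    (hwf : ∀ e ∈ l, ∃ L, pvWF L e) (hsep : l.Pairwise pvSep) :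
    l.Pairwise (fun a b => a.1 ≠ b.1) := by
  refine hsep.imp_of_mem ?_
  intro a b ha hb hab
  obtain ⟨La, hwa⟩ := hwf a ha
  obtain ⟨Lb, hwb⟩ := hwf b hb
  exact pvKeys_ne_of_sep hab hwa hwb

theorem pvEraseMid (c1 c2 : List (String × (List String × Int))) (w : String × (List String × Int))
    (h1 : ∀ p ∈ c1, p.1 ≠ w.1) (h2 : ∀ p ∈ c2, p.1 ≠ w.1) :
    (PySem.Dict.mk (c1 ++ w :: c2)).erase w.1 = PySem.Dict.mk (c1 ++ c2) := by
  unfold PySem.Dict.erase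
  congr 1
  simp only [PySem.Dict.items, List.filter_append, List.filter_cons]
  have hw : ((!w.1 == w.1) : Bool) = false := by simp
  rw [hw]
  simp only [Bool.false_eq_true, if_false]
  rw [List.filter_eq_self.mpr, List.filter_eq_self.mpr]
  · intro p hp; simpa using h2 p hp
  · intro p hp; simpa using h1 p hp

theorem pvGet?Mid (c1 c2 : List (String × (List String × Int))) (w : String × (List String × Int))
    (h1 : ∀ p ∈ c1, p.1 ≠ w.1) :
    (PySem.Dict.mk (c1 ++ w :: c2)).get? w.1 = some w.2 := by
  simp only [PySem.Dict.get?, PySem.Dict.items, List.find?_append]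
  have : w.1 ∉ c1.map (·.1) := by
    intro hmem
    obtain ⟨p, hp, hpk⟩ := List.mem_map.mp hmem
    exact h1 p hp hpk
  rw [pvFind?_none c1 w.1 this]
  simp

theorem pvRoundAux (work : List (String × (List String × Int))) :
    ∀ (cur gprev : List (String × (List String × Int))) (level : Int),
    work = cur.filter (fun e => decide (e.2.1.length > 1)) →
    1 ≤ level →
    (∀ e ∈ cur, pvWF level e) →
    (∀ e ∈ cur, e.2.1.length > 1 → e.2.2 = level) →
    (∀ e ∈ gprev, pvWF (level + 1) e ∧ e.2.2 = level + 1) →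
    (cur ++ gprev).Pairwise pvSep →
    (((work.map (·.1)).foldl pvAStep (PySem.Dict.mk (cur ++ gprev))).items
      = cur.filter (fun e => !decide (e.2.1.length > 1)) ++ gprev
          ++ work.flatMap (fun e => (pvGrouped e.2.1 (level + 1)).map (pvDeco (level + 1))))
    ∧ (∀ e ∈ cur.filter (fun e => !decide (e.2.1.length > 1)) ++ gprev
          ++ work.flatMap (fun e => (pvGrouped e.2.1 (level + 1)).map (pvDeco (level + 1))),
        pvWF (level + 1) e ∧ (e.2.1.length > 1 → e.2.2 = level + 1))
    ∧ (cur.filter (fun e => !decide (e.2.1.length > 1)) ++ gprev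
          ++ work.flatMap (fun e => (pvGrouped e.2.1 (level + 1)).map (pvDeco (level + 1)))).Pairwise pvSep := by
  induction work with
  | nil =>
    intro cur gprev level hwork hl hwfc hmul hwfg hsep
    have hfilter : cur.filter (fun e => !decide (e.2.1.length > 1)) = cur := by
      rw [List.filter_eq_self]
      intro e he
      by_contra hne
      have : e ∈ cur.filter (fun e => decide (e.2.1.length > 1)) := by
        rw [List.mem_filter]
        exact ⟨he, by simpa using hne⟩
      rw [← hwork] at this
      simp at this
    simp only [List.map_nil, List.foldl_nil, List.flatMap_nil, List.append_nil, hfilter]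
    refine ⟨by simp, ?_, hsep⟩
    intro e he
    rcases List.mem_append.mp he with h | h
    · obtain ⟨h1, h2, h3, h4⟩ := hwfc e h
      refine ⟨⟨h1, h2, by omega, h4⟩, ?_⟩
      intro hm
      exfalso
      have : e ∈ cur.filter (fun e => decide (e.2.1.length > 1)) := by
        rw [List.mem_filter]
        exact ⟨h, by simpa using hm⟩
      rw [← hwork] at this
      simp at this
    · exact ⟨(hwfg e h).1, fun _ => (hwfg e h).2⟩
  | cons w wt ih =>
    intro cur gprev level hwork hl hwfc hmul hwfg hsep
    obtain ⟨c1, c2, hcur, hc1, hwmul, hc2⟩ := List.filter_eq_cons_iff.mp hwork.symm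
    subst hcur
    -- keys are pairwise distinct
    have hwfall : ∀ e ∈ (c1 ++ w :: c2) ++ gprev, ∃ L, pvWF L e := by
      intro e he
      rcases List.mem_append.mp he with h | h
      · exact ⟨level, hwfc e h⟩
      · exact ⟨level + 1, (hwfg e h).1⟩
    have hkeys := pvKeysNe_of_list hwfall hsep
    -- w is in cur and multi
    have hwcur : w ∈ c1 ++ w :: c2 := by simp
    have hwlv : w.2.2 = level := hmul w hwcur (by simpa using hwmul)
    -- pvSep of w with every other entry
    have hsepw : ∀ e ∈ c1 ++ c2 ++ gprev, pvSep w e ∧ pvSep e w := by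
      intro e he
      have hpair := hsep
      rw [show (c1 ++ w :: c2) ++ gprev = c1 ++ w :: (c2 ++ gprev) by simp] at hpair
      rw [List.pairwise_append] at hpair
      obtain ⟨hp1, hp2, hp12⟩ := hpair
      rcases List.mem_append.mp he with h | h
      · rcases List.mem_append.mp h with h' | h'
        · have := hp12 e h' w (by simp)
          exact ⟨pvSep_symm this, this⟩
        · have := (List.pairwise_cons.mp hp2).1 e (by simp [h'])
          exact ⟨this, pvSep_symm this⟩
      · have := (List.pairwise_cons.mp hp2).1 e (by simp [h])
        exact ⟨this, pvSep_symm this⟩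
    have hkeysw : ∀ e ∈ c1 ++ c2 ++ gprev, e.1 ≠ w.1 := by
      intro e he
      obtain ⟨Le, hwe⟩ := hwfall e (by
        rcases List.mem_append.mp he with h | h
        · rcases List.mem_append.mp h with h' | h'
          · exact List.mem_append.mpr (Or.inl (by simp [h']))
          · exact List.mem_append.mpr (Or.inl (by simp [h']))
        · exact List.mem_append.mpr (Or.inr h))
      exact pvKeys_ne_of_sep (hsepw e he).2 hwe (hwfc w hwcur)
    -- first fold step
    have hget : (PySem.Dict.mk ((c1 ++ w :: c2) ++ gprev)).get? w.1 = some w.2 := by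
      rw [show (c1 ++ w :: c2) ++ gprev = c1 ++ w :: (c2 ++ gprev) by simp]
      exact pvGet?Mid c1 (c2 ++ gprev) w
        (fun p hp => hkeysw p (by simp [hp]))
    have herase : (PySem.Dict.mk ((c1 ++ w :: c2) ++ gprev)).erase w.1
        = PySem.Dict.mk (c1 ++ c2 ++ gprev) := by
      rw [show (c1 ++ w :: c2) ++ gprev = c1 ++ w :: (c2 ++ gprev) by simp]
      rw [pvEraseMid c1 (c2 ++ gprev) w (fun p hp => hkeysw p (by simp [hp]))
        (fun p hp => hkeysw p (by
          rcases List.mem_append.mp hp with h | h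
          · exact List.mem_append.mpr (Or.inl (List.mem_append.mpr (Or.inr h)))
          · exact List.mem_append.mpr (Or.inr h)))]
      simp
    -- freshness of the new labels
    have hfresh : ∀ m ∈ w.2.1, pvLabel (level + 1) m ∉ (c1 ++ c2 ++ gprev).map (·.1) := by
      intro m hm hmem
      obtain ⟨e, he, hek⟩ := List.mem_map.mp hmem
      obtain ⟨Le, hwe⟩ := hwfall e (by
        rcases List.mem_append.mp he with h | h
        · rcases List.mem_append.mp h with h' | h'
          · exact List.mem_append.mpr (Or.inl (by simp [h']))
          · exact List.mem_append.mpr (Or.inl (by simp [h']))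
        · exact List.mem_append.mpr (Or.inr h))
      obtain ⟨hne, hle1, _, hlab⟩ := hwe
      obtain ⟨fnE, hfnE⟩ := List.exists_mem_of_ne_nil _ hne
      have hsep' := (hsepw e he).2
      have := pvSep_lift hsep' hle1 (by omega) (K1 := e.2.2) (K2 := level + 1)
        (by omega) (by omega) hfnE hm
      exact this (by rw [hlab fnE hfnE, hek])
    -- the first fold step rewrites the state
    have hsetst : pvSetState w.2.1 (level + 1) (PySem.Dict.mk (c1 ++ c2 ++ gprev))
        = PySem.Dict.mk ((c1 ++ c2) ++ (gprev
            ++ (pvGrouped w.2.1 (level + 1)).map (pvDeco (level + 1)))) := by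
      apply PySem.Dict.ext
      rw [pvSetState_fresh _ _ _ hfresh]
      rw [pvGrouped_deco]
      simp [List.append_assoc]
    have ihapp := ih (c1 ++ c2) (gprev ++ (pvGrouped w.2.1 (level + 1)).map (pvDeco (level + 1))) level
      (by
        rw [List.filter_append, List.filter_eq_nil_iff.mpr hc1, hc2]
        simp)
      hl
      (fun e he => hwfc e (by
        rcases List.mem_append.mp he with h | h
        · exact List.mem_append.mpr (Or.inl h)
        · exact List.mem_append.mpr (Or.inr (List.mem_cons_of_mem w h))))
      (fun e he => hmul e (by
        rcases List.mem_append.mp he with h | h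
        · exact List.mem_append.mpr (Or.inl h)
        · exact List.mem_append.mpr (Or.inr (List.mem_cons_of_mem w h))))
      (by
        intro e he
        rcases List.mem_append.mp he with h | h
        · exact hwfg e h
        · obtain ⟨p, hp, rfl⟩ := List.mem_map.mp h
          obtain ⟨hne, hlab, hmem⟩ := pvGrouped_wf w.2.1 (level + 1) p hp
          refine ⟨⟨?_, ?_, ?_, ?_⟩, rfl⟩
          · simpa [pvDeco] using hne
          · simp only [pvDeco]
            omega
          · simp only [pvDeco]
            omega
          · simpa [pvDeco] using hlab)
      (by
        -- Pairwise pvSep on (c1 ++ c2) ++ (gprev ++ new groups)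
        have hold : ((c1 ++ c2) ++ gprev).Pairwise pvSep := by
          refine List.Pairwise.sublist ?_ hsep
          have h1 : (c2 ++ gprev).Sublist (w :: (c2 ++ gprev)) := List.sublist_cons_self _ _
          have h2 := h1.append_left c1
          simpa [List.append_assoc] using h2
        have hnew : ((pvGrouped w.2.1 (level + 1)).map (pvDeco (level + 1))).Pairwise pvSep :=
          pvGrouped_sep _ _
        have hcross : ∀ e ∈ c1 ++ c2 ++ gprev,
            ∀ g ∈ (pvGrouped w.2.1 (level + 1)).map (pvDeco (level + 1)), pvSep e g := by
          intro e he g hg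
          obtain ⟨p, hp, rfl⟩ := List.mem_map.mp hg
          obtain ⟨hLe, hwe⟩ := hwfall e (by
            rcases List.mem_append.mp he with h | h
            · rcases List.mem_append.mp h with h' | h'
              · exact List.mem_append.mpr (Or.inl (by simp [h']))
              · exact List.mem_append.mpr (Or.inl (by simp [h']))
            · exact List.mem_append.mpr (Or.inr h))
          intro fnE hfnE m' hm'
          have hm'w : m' ∈ w.2.1 := (pvGrouped_wf w.2.1 (level + 1) p hp).2.2 m' hm'
          refine pvSep_lift (hsepw e he).2 hwe.2.1 (by rw [hwlv]; omega) ?_ ?_ hfnE hm'w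
          · simp only [pvDeco]
            rw [hwlv]
            omega
          · simp only [pvDeco]
            rw [hwlv]
            omega
        rw [List.pairwise_append]
        refine ⟨(List.pairwise_append.mp hold).1, ?_, ?_⟩
        · rw [List.pairwise_append]
          exact ⟨(List.pairwise_append.mp hold).2.1, hnew,
            fun a ha b hb => hcross a (by simp [ha]) b hb⟩
        · intro a ha b hb
          rcases List.mem_append.mp hb with h | h
          · exact (List.pairwise_append.mp hold).2.2 a ha b h
          · exact hcross a (by
              rcases List.mem_append.mp ha with h' | h'
              · exact List.mem_append.mpr (Or.inl (List.mem_append.mpr (Or.inl h')))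
              · exact List.mem_append.mpr (Or.inl (List.mem_append.mpr (Or.inr h')))) b h)
    -- assemble
    obtain ⟨heq, hpack, hsepres⟩ := ihapp
    have hfc1 : (c1 ++ w :: c2).filter (fun e => !decide (e.2.1.length > 1))
        = c1 ++ c2.filter (fun e => !decide (e.2.1.length > 1)) := by
      rw [List.filter_append, List.filter_cons]
      rw [List.filter_eq_self.mpr (fun a ha => by simpa using hc1 a ha)]
      rw [if_neg (by simpa using hwmul)]
    have hfc2 : (c1 ++ c2).filter (fun e => !decide (e.2.1.length > 1))
        = c1 ++ c2.filter (fun e => !decide (e.2.1.length > 1)) := by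
      rw [List.filter_append]
      rw [List.filter_eq_self.mpr (fun a ha => by simpa using hc1 a ha)]
    have hlists : (c1 ++ c2).filter (fun e => !decide (e.2.1.length > 1))
          ++ (gprev ++ (pvGrouped w.2.1 (level + 1)).map (pvDeco (level + 1)))
          ++ wt.flatMap (fun e => (pvGrouped e.2.1 (level + 1)).map (pvDeco (level + 1)))
        = (c1 ++ w :: c2).filter (fun e => !decide (e.2.1.length > 1)) ++ gprev
          ++ (w :: wt).flatMap (fun e => (pvGrouped e.2.1 (level + 1)).map (pvDeco (level + 1))) := by
      rw [hfc1, hfc2, List.flatMap_cons]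
      simp [List.append_assoc]
    refine ⟨?_, ?_, ?_⟩
    · rw [List.map_cons, List.foldl_cons]
      have hstep2 : pvAStep (PySem.Dict.mk ((c1 ++ w :: c2) ++ gprev)) w.1
          = PySem.Dict.mk ((c1 ++ c2) ++ (gprev
              ++ (pvGrouped w.2.1 (level + 1)).map (pvDeco (level + 1)))) := by
        unfold pvAStep
        rw [hget, show (some w.2 : Option (List String × Int)) = some (w.2.1, w.2.2) from rfl]
        dsimp only
        rw [hwlv, herase, hsetst]
      rw [hstep2, heq, hlists]
    · rw [← hlists]
      exact hpack
    · rw [← hlists]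
      exact hsepres

def pvProj (e : String × (List String × Int)) : String × List String := (e.1, e.2.1)
def pvRender (items : List (String × (List String × Int))) : List (String × String) :=
  items.map (fun e => (e.2.1.headI, e.1))
def pvDRender (p : String × String) : String × List String := (p.2, [p.1])

theorem pvPendingFold (level : Int) (P : List (String × List String)) :
    ∀ (dn : List (String × String)) (nx : List (String × List String)),
    P.foldl (fun (acc : List (String × String) × List (String × List String)) p =>
        if p.2.length = 1 then (acc.1 ++ [(p.2.headI, p.1)], acc.2)
        else (acc.1, acc.2 ++ pvGrouped p.2 (level + 1))) (dn, nx)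
      = (dn ++ (P.filter (fun p => decide (p.2.length = 1))).map (fun p => (p.2.headI, p.1)),
         nx ++ (P.filter (fun p => !decide (p.2.length = 1))).flatMap (fun p => pvGrouped p.2 (level + 1))) := by
  induction P with
  | nil => intro dn nx; simp
  | cons p P ih =>
    intro dn nx
    simp only [List.foldl_cons]
    by_cases hp : p.2.length = 1
    · rw [if_pos hp]
      rw [ih]
      simp [List.filter_cons, hp, List.append_assoc]
    · rw [if_neg hp]
      rw [ih]
      simp [List.filter_cons, hp, List.append_assoc]

theorem pvLoopB_nil (fuel : Nat) (level : Int) (dn : List (String × String)) :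
    pvLoopB fuel level dn [] = dn := by
  cases fuel <;> simp [pvLoopB]

theorem pvRender_proj (items : List (String × (List String × Int))) :
    pvRender items = (items.map pvProj).map (fun q => (q.2.headI, q.1)) := by
  simp only [pvRender, pvProj, List.map_map]
  rfl

theorem pvDRender_id (dn : List (String × String)) :
    (dn.map pvDRender).map (fun q => (q.2.headI, q.1)) = dn := by
  simp only [List.map_map]
  have : ∀ p : String × String, ((fun q : String × List String => (q.2.headI, q.1)) ∘ pvDRender) p = p := by
    intro p
    simp [pvDRender]
  rw [List.map_congr_left (fun p _ => this p)]
  simp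

theorem pvFilter_proj (st : List (String × (List String × Int))) (p : String × List String → Bool) :
    (st.filter (fun e => p (pvProj e))).map pvProj = (st.map pvProj).filter p := by
  rw [List.filter_map]
  rfl

theorem pvProj_deco (lv : Int) (g : List (String × List String)) :
    (g.map (pvDeco lv)).map pvProj = g := by
  simp only [List.map_map]
  have : ∀ p : String × List String, (pvProj ∘ pvDeco lv) p = p := by
    intro p
    simp [pvProj, pvDeco]
  rw [List.map_congr_left (fun p _ => this p)]
  simp

theorem pvMainLoop (fuel : Nat) : ∀ (level : Int) (done : List (String × String))
    (pending : List (String × List String)) (st : PySem.Dict String (List String × Int)),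
    1 ≤ level →
    st.items.map pvProj = done.map pvDRender ++ pending →
    (∀ e ∈ st.items, pvWF level e) →
    st.items.Pairwise pvSep →
    (∀ e ∈ st.items, e.2.1.length > 1 → e.2.2 = level) →
    pvRender (pvLoopA fuel st).items = pvLoopB fuel level done pending := by
  induction fuel with
  | zero =>
    intro level done pending st hl hproj hwf hsep hmul
    simp only [pvLoopA, pvLoopB]
    rw [pvRender_proj, hproj, List.map_append, pvDRender_id]
  | succ fuel ih =>
    intro level done pending st hl hproj hwf hsep hmul
    -- pending entries are nonempty member lists
    have hpend_ne : ∀ p ∈ pending, p.2 ≠ [] := by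
      intro p hp
      have hmem : p ∈ st.items.map pvProj := by
        rw [hproj]
        exact List.mem_append.mpr (Or.inr hp)
      obtain ⟨e, he, rfl⟩ := List.mem_map.mp hmem
      exact (hwf e he).1
    -- the multi filter projects onto pending's multi filter
    have hfiltm : (st.items.filter (fun e => decide (e.2.1.length > 1))).map pvProj
        = pending.filter (fun p => decide (p.2.length > 1)) := by
      have h1 : (st.items.filter (fun e => decide (e.2.1.length > 1))).map pvProj
          = (st.items.map pvProj).filter (fun q => decide (q.2.length > 1)) :=
        pvFilter_proj st.items (fun q => decide (q.2.length > 1))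
      rw [h1, hproj, List.filter_append]
      have h2 : (done.map pvDRender).filter (fun p => decide (p.2.length > 1)) = [] := by
        rw [List.filter_eq_nil_iff]
        intro q hq
        obtain ⟨d, _, rfl⟩ := List.mem_map.mp hq
        simp [pvDRender]
      rw [h2, List.nil_append]
    have hfilts : (st.items.filter (fun e => !decide (e.2.1.length > 1))).map pvProj
        = done.map pvDRender ++ pending.filter (fun p => !decide (p.2.length > 1)) := by
      have h1 : (st.items.filter (fun e => !decide (e.2.1.length > 1))).map pvProj
          = (st.items.map pvProj).filter (fun q => !decide (q.2.length > 1)) :=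
        pvFilter_proj st.items (fun q => !decide (q.2.length > 1))
      rw [h1, hproj, List.filter_append]
      have h2 : (done.map pvDRender).filter (fun p => !decide (p.2.length > 1)) = done.map pvDRender := by
        rw [List.filter_eq_self]
        intro q hq
        obtain ⟨d, _, rfl⟩ := List.mem_map.mp hq
        simp [pvDRender]
      rw [h2]
    -- '== 1' and 'not > 1' coincide on pending
    have hfc : pending.filter (fun p => !decide (p.2.length = 1))
        = pending.filter (fun p => decide (p.2.length > 1)) := by
      apply List.filter_congr
      intro p hp
      have h1 : p.2.length ≥ 1 := List.length_pos_iff.mpr (hpend_ne p hp)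
      by_cases h : p.2.length = 1 <;> simp [h] <;> omega
    have hfc2 : pending.filter (fun p => decide (p.2.length = 1))
        = pending.filter (fun p => !decide (p.2.length > 1)) := by
      apply List.filter_congr
      intro p hp
      have h1 : p.2.length ≥ 1 := List.length_pos_iff.mpr (hpend_ne p hp)
      by_cases h : p.2.length = 1 <;> simp [h] <;> omega
    by_cases hamb : st.items.filter (fun e => decide (e.2.1.length > 1)) = []
    · -- no ambiguous labels: A stops
      have hA : pvLoopA (fuel + 1) st = st := by
        simp [pvLoopA, hamb]
      have hpm : pending.filter (fun p => decide (p.2.length > 1)) = [] := by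
        rw [← hfiltm, hamb]
        rfl
      by_cases hpe : pending = []
      · subst hpe
        rw [hA, pvLoopB_nil, pvRender_proj, hproj]
        simp only [List.append_nil]
        exact pvDRender_id done
      · rw [hA]
        have hBne : pending.isEmpty = false := by
          simpa using hpe
        rw [pvLoopB]
        simp only [hBne, Bool.false_eq_true, if_false]
        rw [pvPendingFold]
        have hs1 : pending.filter (fun p => decide (p.2.length = 1)) = pending := by
          rw [hfc2]
          apply List.filter_eq_self.mpr
          intro p hp
          have := List.filter_eq_nil_iff.mp hpm p hp
          simpa using this
        have hs2 : pending.filter (fun p => !decide (p.2.length = 1)) = [] := by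
          rw [hfc, hpm]
        rw [hs1, hs2]
        simp only [List.flatMap_nil, List.append_nil, List.nil_append]
        rw [pvLoopB_nil]
        rw [pvRender_proj, hproj, List.map_append, pvDRender_id]
    · -- a real round: ambiguous labels exist
      obtain ⟨heq, hpack, hsepres⟩ :=
        pvRoundAux (st.items.filter (fun e => decide (e.2.1.length > 1))) st.items [] level rfl hl
          hwf hmul (by simp) (by simpa using hsep)
      have hItems : PySem.Dict.mk (st.items ++ []) = st := by
        apply PySem.Dict.ext
        simp
      rw [hItems] at heq
      have hAne : (((st.items.filter (fun e => decide (e.2.1.length > 1))).map (·.1)).isEmpty = true) → False := by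
        intro h
        rw [List.isEmpty_iff, List.map_eq_nil_iff] at h
        exact hamb h
      have hpne : pending ≠ [] := by
        intro h
        rw [h] at hfiltm
        simp only [List.filter_nil] at hfiltm
        exact hamb (List.map_eq_nil_iff.mp hfiltm)
      have hBne : pending.isEmpty = false := by
        simpa using hpne
      -- unfold one A round and one B round
      rw [pvLoopA]
      rw [if_neg hAne]
      rw [pvLoopB]
      simp only [hBne, Bool.false_eq_true, if_false]
      rw [pvPendingFold]
      simp only [List.nil_append]
      -- apply the induction hypothesis to the new state
      apply ih (level + 1)
      · omega
      · -- projection invariant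
        rw [heq]
        simp only [List.append_nil, List.map_append]
        rw [hfilts]
        have hng : ((st.items.filter (fun e => decide (e.2.1.length > 1))).flatMap
              (fun e => (pvGrouped e.2.1 (level + 1)).map (pvDeco (level + 1)))).map pvProj
            = (st.items.filter (fun e => decide (e.2.1.length > 1))).flatMap
              (fun e => pvGrouped e.2.1 (level + 1)) := by
          rw [List.map_flatMap]
          simp only [pvProj_deco]
        rw [hng]
        -- done side
        have hback : ((pending.filter (fun p => decide (p.2.length = 1))).map
              (fun p => (p.2.headI, p.1))).map pvDRender
            = pending.filter (fun p => !decide (p.2.length > 1)) := by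
          rw [List.map_map, ← hfc2]
          have hcong : ∀ p ∈ pending.filter (fun p => decide (p.2.length = 1)),
              (pvDRender ∘ fun p : String × List String => (p.2.headI, p.1)) p = p := by
            intro p hp
            have hp1 : p.2.length = 1 := by simpa using (List.mem_filter.mp hp).2
            obtain ⟨x, hx⟩ : ∃ x, p.2 = [x] := List.length_eq_one_iff.mp hp1
            obtain ⟨a, b⟩ := p
            simp only at hx
            subst hx
            simp [pvDRender]
          rw [List.map_congr_left hcong]
          simp
        -- pending side
        have hpend : (pending.filter (fun p => !decide (p.2.length = 1))).flatMap
              (fun p => pvGrouped p.2 (level + 1))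
            = (st.items.filter (fun e => decide (e.2.1.length > 1))).flatMap
              (fun e => pvGrouped e.2.1 (level + 1)) := by
          rw [hfc, ← hfiltm, List.flatMap_map]
          rfl
        rw [hpend, hback]
      · -- well-formedness
        intro e he
        rw [heq] at he
        exact (hpack e (by simpa using he)).1
      · -- separation
        rw [heq]
        simpa using hsepres
      · -- multi entries sit at the new level
        intro e he
        rw [heq] at he
        exact (hpack e (by simpa using he)).2

theorem pvTop (names : List String) : function_labels names = function_labels_alt names := by
  unfold function_labels function_labels_alt
  have hst0 : (pvSetState names 1 PySem.Dict.empty).items = (pvGrouped names 1).map (pvDeco 1) :=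
    pvGrouped_deco names 1
  have := pvMainLoop (pvFuel names) 1 [] (pvGrouped names 1) (pvSetState names 1 PySem.Dict.empty)
    (by omega)
    (by rw [hst0, pvProj_deco]; simp)
    (by
      intro e he
      rw [hst0] at he
      obtain ⟨p, hp, rfl⟩ := List.mem_map.mp he
      obtain ⟨hne, hlab, _⟩ := pvGrouped_wf names 1 p hp
      refine ⟨?_, ?_, ?_, ?_⟩
      · simpa [pvDeco] using hne
      · simp [pvDeco]
      · simp [pvDeco]
      · simpa [pvDeco] using hlab)
    (by rw [hst0]; exact pvGrouped_sep names 1)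
    (by
      intro e he _
      rw [hst0] at he
      obtain ⟨p, hp, rfl⟩ := List.mem_map.mp he
      rfl)
  exact this

-- ===== VERDICT (by name: the statement is the Claim_ definition above) =====
theorem function_labels_spec : Claim_equal_function_labels := by
  intro names _
  unfold Spec_function_labels
  exact pvTop names
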